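-- pv_equiv track=rewrite | github.com/ManuSerp/ThreatPredictor | src/lib/cluster_label.py | calc_stat
-- ===== SOURCE A (Python) =====
-- def calc_stat(label,predict_label):
--     res = {}
--     for i in range(len(label)):
--         if label[i] not in res:
--             res[label[i]] = {}
--             res[label[i]]['total'] = 0
--             res[label[i]]['correct'] = 0
--         res[label[i]]['total'] += 1
--         if label[i] == predict_label[i]:
--             res[label[i]]['correct'] += 1
--     return res
-- ===== SOURCE B (Python) =====
-- def calc_stat(label, predict_label):
--     # Per-key counting: dedup the labels once, then count each distinct label's
--     # occurrences and its correct predictions by whole-list scans.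
--     pairs = list(zip(label, predict_label))
--     return {k: {'total': label.count(k), 'correct': pairs.count((k, k))}
--             for k in dict.fromkeys(label)}
-- ===== Notes on version B (the rewrite author's own statement) =====
-- stated objective: simpler
-- what changed: A builds the nested result in a single pass, mutating a dict of per-label dicts in place; B dedups the labels once and then, for each distinct label, counts its occurrences and its correct predictions by whole-list count() scans assembled in one comprehension (O(n*k) per-key counting instead of O(n) incremental accumulation).
import Mathlib
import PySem

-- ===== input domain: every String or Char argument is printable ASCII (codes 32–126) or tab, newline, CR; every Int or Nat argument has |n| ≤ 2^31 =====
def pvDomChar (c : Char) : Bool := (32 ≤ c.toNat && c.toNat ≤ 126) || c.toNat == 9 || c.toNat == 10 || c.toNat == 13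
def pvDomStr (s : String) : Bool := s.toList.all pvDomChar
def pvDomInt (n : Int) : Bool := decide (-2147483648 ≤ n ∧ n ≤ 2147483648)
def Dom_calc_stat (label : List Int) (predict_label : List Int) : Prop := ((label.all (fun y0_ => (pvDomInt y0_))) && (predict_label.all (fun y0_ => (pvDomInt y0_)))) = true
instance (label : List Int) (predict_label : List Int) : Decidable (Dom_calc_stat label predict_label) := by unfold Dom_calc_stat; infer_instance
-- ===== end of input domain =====

-- B replaces A's single-pass in-place nested-dict accumulation by per-key counting:
-- dedup the labels once, then count per distinct label by whole-list scans (objective: alternative).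

-- ===== PORT A =====
-- literal transliteration of A: one dict of dicts, initialised on first sight, mutated in place.
def calc_stat (label : List Int) (predict_label : List Int) : List (Int × List (String × Int)) :=
  let res : PySem.Dict Int (PySem.Dict String Int) :=
    (PySem.List.pyRange 0 (label.length) 1).foldl (fun res i =>
      let l := PySem.List.pyGetD label i 0
      -- predict_label[i]: IndexError (i ≥ len) is excluded by Pre_calc_stat, so getD is exact here
      let p := PySem.List.pyGetD predict_label i 0
      let res := if res.contains l then res
        else res.insert l ((PySem.Dict.empty.insert "total" 0).insert "correct" 0)
      let res := res.modify l PySem.Dict.empty (fun d => d.modify "total" 0 (· + 1))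
      if l == p then res.modify l PySem.Dict.empty (fun d => d.modify "correct" 0 (· + 1)) else res)
      PySem.Dict.empty
  res.items.map (fun kd => (kd.1, kd.2.items))

-- ===== PORT B =====
-- literal transliteration of B: zip once, dedup the labels, count per distinct label by whole-list scans.
def calc_stat_alt (label : List Int) (predict_label : List Int) : List (Int × List (String × Int)) :=
  let pairs := label.zip predict_label
  (PySem.List.dedup label).map (fun k =>
    (k, [("total", (label.count k : Int)),
         ("correct", (pairs.count (k, k) : Int))]))

-- ===== PRECONDITION & SPEC =====
-- A raises IndexError when predict_label is shorter than label; Pre_ excludes exactly those inputs.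
def Pre_calc_stat (label : List Int) (predict_label : List Int) : Prop :=
  label.length ≤ predict_label.length
instance (label : List Int) (predict_label : List Int) : Decidable (Pre_calc_stat label predict_label) := by unfold Pre_calc_stat; infer_instance
def pvWitness_calc_stat : List Int × List Int := ([1, 2, 1], [1, 3, 2])

def Spec_calc_stat (label : List Int) (predict_label : List Int) (out : List (Int × List (String × Int))) : Prop := out = calc_stat_alt label predict_label
instance (label : List Int) (predict_label : List Int) (out : List (Int × List (String × Int))) : Decidable (Spec_calc_stat label predict_label out) := by unfold Spec_calc_stat; infer_instance

-- ===== CLAIM (what is proved, stated in full; the proofs are below) =====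
def Claim_equal_calc_stat : Prop := ∀ (label : List Int) (predict_label : List Int), Dom_calc_stat label predict_label → Pre_calc_stat label predict_label → Spec_calc_stat label predict_label (calc_stat label predict_label)

-- ===== LEMMAS AND PROOFS =====

-- A's loop body, abstracted over the (label[i], predict_label[i]) pair
def pvStep (res : PySem.Dict Int (PySem.Dict String Int)) (pr : Int × Int) :
    PySem.Dict Int (PySem.Dict String Int) :=
  if pr.1 == pr.2 then
    (((if res.contains pr.1 then res
        else res.insert pr.1 ((PySem.Dict.empty.insert "total" 0).insert "correct" 0)).modify
      pr.1 PySem.Dict.empty (fun d => d.modify "total" 0 (· + 1))).modify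
      pr.1 PySem.Dict.empty (fun d => d.modify "correct" 0 (· + 1)))
  else
    ((if res.contains pr.1 then res
        else res.insert pr.1 ((PySem.Dict.empty.insert "total" 0).insert "correct" 0)).modify
      pr.1 PySem.Dict.empty (fun d => d.modify "total" 0 (· + 1)))

-- invariant: after processing the pair list l, A's dict has exactly the per-key counts of l
def pvInv (l : List (Int × Int)) (res : PySem.Dict Int (PySem.Dict String Int)) : Prop :=
  res.keys = PySem.List.dedup (l.map Prod.fst) ∧
  ∀ k ∈ res.keys, res.getD k PySem.Dict.empty =
    PySem.Dict.mk [("total", ((l.map Prod.fst).count k : Int)),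
                   ("correct", (l.countP (fun pr => pr.1 == k && pr.2 == k) : Int))]

theorem pvModTotal (t c : Int) : (PySem.Dict.mk [("total", t), ("correct", c)]).modify "total" 0 (· + 1) = PySem.Dict.mk [("total", t + 1), ("correct", c)] := by
  simp [PySem.Dict.modify, PySem.Dict.insert, PySem.Dict.getD, PySem.Dict.get?, PySem.Dict.contains]

theorem pvModCorrect (t c : Int) : (PySem.Dict.mk [("total", t), ("correct", c)]).modify "correct" 0 (· + 1) = PySem.Dict.mk [("total", t), ("correct", c + 1)] := by
  simp [PySem.Dict.modify, PySem.Dict.insert, PySem.Dict.getD, PySem.Dict.get?, PySem.Dict.contains]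

-- the stepped dict, written as one insert (given res's entry at pr.1, or its absence)
theorem pvStep_eq_of_contains (res : PySem.Dict Int (PySem.Dict String Int)) (pr : Int × Int)
    (t c : Int) (hc : res.contains pr.1 = true)
    (hg : res.getD pr.1 PySem.Dict.empty = PySem.Dict.mk [("total", t), ("correct", c)]) :
    pvStep res pr = res.insert pr.1 (PySem.Dict.mk
      [("total", t + 1), ("correct", if pr.1 = pr.2 then c + 1 else c)]) := by
  unfold pvStep
  have e2 : res.modify pr.1 PySem.Dict.empty (fun d => d.modify "total" 0 (· + 1))
      = res.insert pr.1 (PySem.Dict.mk [("total", t + 1), ("correct", c)]) := by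
    rw [PySem.Dict.modify, hg, pvModTotal]
  by_cases hlp : pr.1 = pr.2
  · have hbeq : (pr.1 == pr.2) = true := by simp [hlp]
    have e3 : (res.insert pr.1 (PySem.Dict.mk [("total", t + 1), ("correct", c)])).modify
        pr.1 PySem.Dict.empty (fun d => d.modify "correct" 0 (· + 1))
        = res.insert pr.1 (PySem.Dict.mk [("total", t + 1), ("correct", c + 1)]) := by
      rw [PySem.Dict.modify, PySem.Dict.getD_insert_self, pvModCorrect, PySem.Dict.insert_insert_self]
    rw [if_pos hbeq, if_pos hc, e2, e3, if_pos hlp]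
  · have hbeq : (pr.1 == pr.2) = false := by simp [hlp]
    rw [if_neg (by simp [hbeq]), if_pos hc, e2, if_neg hlp]

theorem pvStep_eq_of_not_contains (res : PySem.Dict Int (PySem.Dict String Int)) (pr : Int × Int)
    (hc : res.contains pr.1 = false) :
    pvStep res pr = res.insert pr.1 (PySem.Dict.mk
      [("total", 1), ("correct", if pr.1 = pr.2 then 1 else 0)]) := by
  unfold pvStep
  have hinit : ((PySem.Dict.empty.insert "total" 0).insert "correct" 0 : PySem.Dict String Int)
      = PySem.Dict.mk [("total", 0), ("correct", 0)] := rfl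
  have e2 : (res.insert pr.1 (PySem.Dict.mk [("total", 0), ("correct", 0)])).modify
      pr.1 PySem.Dict.empty (fun d => d.modify "total" 0 (· + 1))
      = res.insert pr.1 (PySem.Dict.mk [("total", (0:Int) + 1), ("correct", 0)]) := by
    rw [PySem.Dict.modify, PySem.Dict.getD_insert_self, pvModTotal, PySem.Dict.insert_insert_self]
  by_cases hlp : pr.1 = pr.2
  · have hbeq : (pr.1 == pr.2) = true := by simp [hlp]
    have e3 : (res.insert pr.1 (PySem.Dict.mk [("total", (0:Int) + 1), ("correct", (0:Int))])).modify
        pr.1 PySem.Dict.empty (fun d => d.modify "correct" 0 (· + 1))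
        = res.insert pr.1 (PySem.Dict.mk [("total", (0:Int) + 1), ("correct", (0:Int) + 1)]) := by
      rw [PySem.Dict.modify, PySem.Dict.getD_insert_self, pvModCorrect, PySem.Dict.insert_insert_self]
    rw [if_pos hbeq, if_neg (by simp [hc]), hinit, e2, e3, if_pos hlp]
    norm_num
  · have hbeq : (pr.1 == pr.2) = false := by simp [hlp]
    rw [if_neg (by simp [hbeq]), if_neg (by simp [hc]), hinit, e2, if_neg hlp]
    norm_num

theorem pvCnt_app (l : List Int) (x k : Int) :
    (l ++ [x]).count k = l.count k + (if x = k then 1 else 0) := by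
  by_cases h : x = k <;> simp [List.count_append, h]

theorem pvCntP_app (l : List (Int × Int)) (pr : Int × Int) (k : Int) :
    (l ++ [pr]).countP (fun q => q.1 == k && q.2 == k)
      = l.countP (fun q => q.1 == k && q.2 == k)
        + (if pr.1 = k ∧ pr.2 = k then 1 else 0) := by
  rw [List.countP_append, List.countP_singleton]
  by_cases h1 : pr.1 = k <;> by_cases h2 : pr.2 = k <;> simp [h1, h2]

theorem pvInv_step (l : List (Int × Int)) (res : PySem.Dict Int (PySem.Dict String Int))
    (pr : Int × Int) (h : pvInv l res) : pvInv (l ++ [pr]) (pvStep res pr) := by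
  obtain ⟨hk, h2⟩ := h
  have hkeys' : PySem.List.dedup ((l ++ [pr]).map Prod.fst)
      = (PySem.Set.ofList (l.map Prod.fst)).add pr.1 := by
    simp only [List.map_append, List.map_cons, List.map_nil, PySem.List.dedup_eq_ofList]
    exact PySem.Set.ofList_append_singleton _ _
  have hmap : (l ++ [pr]).map Prod.fst = l.map Prod.fst ++ [pr.1] := by
    simp
  by_cases hmem : pr.1 ∈ l.map Prod.fst
  · have hc : res.contains pr.1 = true := by
      rw [PySem.Dict.contains_eq_decide_mem_keys, hk]
      simp [hmem]
    have hkm : pr.1 ∈ res.keys := by rw [hk]; simp [hmem]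
    rw [pvStep_eq_of_contains res pr _ _ hc (h2 pr.1 hkm)]
    constructor
    · rw [PySem.Dict.keys_insert_of_contains _ _ hc, hk, hkeys']
      simp only [PySem.List.dedup_eq_ofList]
      simp [PySem.Set.add, PySem.Set.contains, PySem.Set.mem_ofList, hmem]
    · intro k hkmem
      by_cases hkl : k = pr.1
      · rw [hkl, PySem.Dict.getD_insert_self]
        have hcnt : ((l ++ [pr]).map Prod.fst).count pr.1
            = (l.map Prod.fst).count pr.1 + 1 := by
          rw [hmap, pvCnt_app]
          simp
        have hcp : (l ++ [pr]).countP (fun q => q.1 == pr.1 && q.2 == pr.1)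
            = l.countP (fun q => q.1 == pr.1 && q.2 == pr.1)
              + (if pr.1 = pr.2 then 1 else 0) := by
          rw [pvCntP_app]
          by_cases he : pr.1 = pr.2 <;> simp [he, eq_comm]
        rw [hcnt, hcp]
        by_cases hlp : pr.1 = pr.2 <;> simp [hlp]
      · have hkm' : k ∈ res.keys := by
          rcases (PySem.Dict.mem_keys_insert _ _ _ _).mp hkmem with h | h
          · exact absurd h hkl
          · exact h
        rw [PySem.Dict.getD_insert_of_ne _ _ _ hkl, h2 k hkm']
        have hne : pr.1 ≠ k := fun he => hkl (he ▸ rfl)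
        have hcnt : ((l ++ [pr]).map Prod.fst).count k = (l.map Prod.fst).count k := by
          rw [hmap, pvCnt_app, if_neg hne]
          ring
        have hcp : (l ++ [pr]).countP (fun q => q.1 == k && q.2 == k)
            = l.countP (fun q => q.1 == k && q.2 == k) := by
          rw [pvCntP_app, if_neg (fun hcc => hne hcc.1)]
          ring
        rw [hcnt, hcp]
  · have hc : res.contains pr.1 = false := by
      rw [PySem.Dict.contains_eq_decide_mem_keys, hk]
      simp [hmem]
    rw [pvStep_eq_of_not_contains res pr hc]
    constructor
    · rw [PySem.Dict.keys_insert_of_not_contains _ _ hc, hk, hkeys']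
      simp only [PySem.List.dedup_eq_ofList]
      simp [PySem.Set.add, PySem.Set.contains, PySem.Set.mem_ofList, hmem]
    · intro k hkmem
      by_cases hkl : k = pr.1
      · rw [hkl, PySem.Dict.getD_insert_self]
        have hcnt : ((l ++ [pr]).map Prod.fst).count pr.1 = 1 := by
          rw [hmap, pvCnt_app, List.count_eq_zero.mpr hmem]
          simp
        have hcp0 : l.countP (fun q => q.1 == pr.1 && q.2 == pr.1) = 0 := by
          apply List.countP_eq_zero.mpr
          intro q hq
          have hq1 : q.1 ≠ pr.1 := fun he => hmem (he ▸ List.mem_map_of_mem hq)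
          simp [hq1]
        have hcp : (l ++ [pr]).countP (fun q => q.1 == pr.1 && q.2 == pr.1)
            = (if pr.1 = pr.2 then 1 else 0) := by
          rw [pvCntP_app, hcp0]
          by_cases he : pr.1 = pr.2 <;> simp [he, eq_comm]
        rw [hcnt, hcp]
        by_cases hlp : pr.1 = pr.2 <;> simp [hlp]
      · have hkm' : k ∈ res.keys := by
          rcases (PySem.Dict.mem_keys_insert _ _ _ _).mp hkmem with h | h
          · exact absurd h hkl
          · exact h
        rw [PySem.Dict.getD_insert_of_ne _ _ _ hkl, h2 k hkm']
        have hne : pr.1 ≠ k := fun he => hkl (he ▸ rfl)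
        have hcnt : ((l ++ [pr]).map Prod.fst).count k = (l.map Prod.fst).count k := by
          rw [hmap, pvCnt_app, if_neg hne]
          ring
        have hcp : (l ++ [pr]).countP (fun q => q.1 == k && q.2 == k)
            = l.countP (fun q => q.1 == k && q.2 == k) := by
          rw [pvCntP_app, if_neg (fun hcc => hne hcc.1)]
          ring
        rw [hcnt, hcp]

theorem pvInv_foldl (l2 l1 : List (Int × Int)) (res : PySem.Dict Int (PySem.Dict String Int))
    (h : pvInv l1 res) : pvInv (l1 ++ l2) (l2.foldl pvStep res) := by
  induction l2 generalizing l1 res with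
  | nil => simpa using h
  | cons x t ih =>
      have := ih (l1 ++ [x]) (pvStep res x) (pvInv_step _ _ _ h)
      simpa using this

-- A's fold over indices is the fold of pvStep over the zipped pairs (predict_label long enough)
theorem pvA_eq_fold (label predict_label : List Int) (h : label.length ≤ predict_label.length) :
    calc_stat label predict_label =
      ((label.zip predict_label).foldl pvStep PySem.Dict.empty).items.map
        (fun kd => (kd.1, kd.2.items)) := by
  unfold calc_stat
  have hlen : ((label.zip predict_label).length : Int) = (label.length : Int) := by
    simp [List.length_zip]
    omega
  have hcongr : (PySem.List.pyRange 0 (label.length) 1).foldl (fun res i =>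
      let l := PySem.List.pyGetD label i 0
      let p := PySem.List.pyGetD predict_label i 0
      let res := if res.contains l then res
        else res.insert l ((PySem.Dict.empty.insert "total" 0).insert "correct" 0)
      let res := res.modify l PySem.Dict.empty (fun d => d.modify "total" 0 (· + 1))
      if l == p then res.modify l PySem.Dict.empty (fun d => d.modify "correct" 0 (· + 1)) else res)
      PySem.Dict.empty
      = (label.zip predict_label).foldl pvStep PySem.Dict.empty := by
    rw [PySem.List.foldl_congr_mem _ _
      (fun acc j => pvStep acc (PySem.List.pyGetD (label.zip predict_label) j (0, 0))) _ ?_]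
    · rw [show ((label.length : Int)) = PySem.List.len (label.zip predict_label) by
        simp [PySem.List.len_eq, List.length_zip]
        omega]
      exact PySem.List.foldl_pyRange_zero_pyGetD _ _ _ _
    · intro acc i hi
      obtain ⟨h0, h1⟩ := (PySem.List.mem_pyRange_one).mp hi
      have hnl : i.toNat < label.length := by omega
      have hnp : i.toNat < predict_label.length := by omega
      have hnz : i.toNat < (label.zip predict_label).length := by
        simp [List.length_zip]; omega
      rw [PySem.List.pyGetD_eq_getElem label _ h0 h1,
          PySem.List.pyGetD_eq_getElem predict_label _ h0 (by omega)]
      have e3 : PySem.List.pyGetD (label.zip predict_label) i ((0 : Int), (0 : Int))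
          = (label[i.toNat], predict_label[i.toNat]) := by
        rw [PySem.List.pyGetD_eq_getElem (label.zip predict_label) _ h0 (by omega)]
        exact List.getElem_zip
      simp only [e3]
      rfl
  rw [hcongr]

-- pairs.count((k,k)) is the countP the invariant tracks
theorem pvCount_pair (pairs : List (Int × Int)) (k : Int) :
    pairs.count (k, k) = pairs.countP (fun q => q.1 == k && q.2 == k) := by
  rw [List.count]
  apply List.countP_congr
  intro q _
  obtain ⟨a, b⟩ := q
  by_cases h1 : a = k <;> by_cases h2 : b = k <;> simp [h1, h2]

-- final assembly: the invariant at the full pair list yields exactly B's output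
theorem pvInv_out (label predict_label : List Int) (h : label.length ≤ predict_label.length)
    (res : PySem.Dict Int (PySem.Dict String Int)) (hinv : pvInv (label.zip predict_label) res) :
    res.items.map (fun kd => (kd.1, kd.2.items)) = calc_stat_alt label predict_label := by
  obtain ⟨hk, h2⟩ := hinv
  have hfst : (label.zip predict_label).map Prod.fst = label := List.map_fst_zip h
  have hnd : res.keys.Nodup := by
    rw [hk]
    exact PySem.List.nodup_dedup _
  rw [PySem.Dict.items_eq_map_keys res hnd PySem.Dict.empty, List.map_map]
  unfold calc_stat_alt
  have hkeys : res.keys = PySem.List.dedup label := by rw [hk, hfst]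
  rw [hkeys]
  apply List.map_congr_left
  intro k hkmem
  have hgd := h2 k (by rw [hkeys]; exact hkmem)
  simp only [Function.comp, hgd, hfst]
  rw [pvCount_pair]

-- ===== VERDICT (by name: the statement is the Claim_ definition above) =====
theorem calc_stat_spec : Claim_equal_calc_stat := by
  intro label predict_label _ hpre
  unfold Spec_calc_stat
  rw [pvA_eq_fold label predict_label hpre]
  have h0 : pvInv [] PySem.Dict.empty :=
    ⟨rfl, by intro k hk; simp [PySem.Dict.empty, PySem.Dict.keys] at hk⟩
  exact pvInv_out label predict_label hpre _
    (by simpa using pvInv_foldl (label.zip predict_label) [] PySem.Dict.empty h0)
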